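-- pv_equiv track=rewrite | github.com/SIDN/workbench | tools/generators/bad_dnssec.py | create_bad_dnssec_tree_zonelist
-- ===== SOURCE A (Python) =====
-- bad_dnssec_tree_delegations = [
--     "ok",
--     "nods",
--     "bogussig",
--     "sigexpired",
--     "signotincepted",
--     "unknownalgorithm"
-- ]
--
-- def create_bad_dnssec_tree_zonelist(name, depth):
--     if depth <= 0:
--         raise Exception("depth must be positive")
--     zonelist = []
--     zonelist.append(name)
--     if depth > 1:
--         for bdtd in bad_dnssec_tree_delegations:
--             zonelist.extend(create_bad_dnssec_tree_zonelist(bdtd + "." + name, depth - 1))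
--     return zonelist
-- ===== SOURCE B (Python) =====
-- bad_dnssec_tree_delegations = [
--     "ok",
--     "nods",
--     "bogussig",
--     "sigexpired",
--     "signotincepted",
--     "unknownalgorithm"
-- ]
--
-- def create_bad_dnssec_tree_zonelist(name, depth):
--     if depth <= 0:
--         raise Exception("depth must be positive")
--     stack = [(name, depth)]
--     result = []
--     while stack:
--         cur, d = stack.pop()
--         result.append(cur)
--         if d > 1:
--             for bdtd in reversed(bad_dnssec_tree_delegations):
--                 stack.append((bdtd + "." + cur, d - 1))
--     return result
-- ===== Notes on version B (the rewrite author's own statement) =====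
-- stated objective: alternative
-- what changed: Replaced the recursive tree expansion by an iterative preorder traversal with an explicit stack (children pushed in reversed order to keep A's preorder output).
import Mathlib
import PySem

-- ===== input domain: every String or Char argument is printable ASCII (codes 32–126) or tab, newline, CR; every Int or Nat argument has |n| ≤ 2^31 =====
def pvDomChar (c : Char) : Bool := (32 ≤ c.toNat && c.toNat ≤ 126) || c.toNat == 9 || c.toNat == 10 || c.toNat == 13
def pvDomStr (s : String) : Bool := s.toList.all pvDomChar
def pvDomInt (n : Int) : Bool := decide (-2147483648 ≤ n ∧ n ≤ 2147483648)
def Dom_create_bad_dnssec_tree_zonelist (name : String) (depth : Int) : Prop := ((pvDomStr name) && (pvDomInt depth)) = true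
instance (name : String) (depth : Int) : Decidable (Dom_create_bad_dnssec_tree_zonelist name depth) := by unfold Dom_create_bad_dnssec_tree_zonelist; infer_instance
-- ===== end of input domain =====

-- B replaces A's recursive tree expansion by an iterative preorder traversal with an
-- explicit stack (children pushed in reversed order), producing the identical zone list;
-- Pre_ excludes depth ≤ 0, where the Python A raises.

-- ===== PORT A =====
def bad_dnssec_tree_delegations : List String :=
  ["ok", "nods", "bogussig", "sigexpired", "signotincepted", "unknownalgorithm"]

-- A's recursion on the integer `depth`, with depth carried as the Nat it equals on
-- the admitted inputs (depth ≥ 1); the 0 case is Python's `raise` (excluded by Pre_).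
-- `pvAgo (n+1) name` computes A for depth = n+1, so A's test `depth > 1` is `n > 0`.
def pvAgo : Nat → String → List String
  | 0, _ => []        -- depth ≤ 0: Python raises Exception("depth must be positive")
  | n + 1, name =>
    let zonelist : List String := [name]
    if 0 < n then     -- depth > 1
      bad_dnssec_tree_delegations.foldl
        (fun zl bdtd => zl ++ pvAgo n (bdtd ++ "." ++ name))   -- zonelist.extend(recursive call with depth-1)
        zonelist
    else zonelist

def create_bad_dnssec_tree_zonelist (name : String) (depth : Int) : List String :=
  pvAgo depth.toNat name   -- depth ≤ 0 ↦ fuel 0 ↦ the (excluded) raise case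

-- ===== PORT B =====
-- number of zone names produced from one stack item of depth k+1 (an upper bound used
-- only as loop fuel, so the while loop is a structural recursion)
def pvNC : Nat → Nat
  | 0 => 1
  | n + 1 => 1 + 6 * pvNC n

-- the while loop of B; the list head is the top of the Python stack, so pushing the
-- delegations in reversed order = prepending the mapped list in original order.
-- The fuel-0 case is never reached: fuel is chosen ≥ the number of iterations.
def pvBLoop : Nat → List (String × Int) → List String → List String
  | _, [], result => result
  | 0, _, result => result
  | fuel + 1, (cur, d) :: rest, result =>
    let result := result ++ [cur]
    if 1 < d then
      pvBLoop fuel ((bad_dnssec_tree_delegations.map (fun bdtd => (bdtd ++ "." ++ cur, d - 1))) ++ rest) result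
    else
      pvBLoop fuel rest result

def create_bad_dnssec_tree_zonelist_alt (name : String) (depth : Int) : List String :=
  if depth ≤ 0 then []   -- Python raises Exception here; excluded by Pre_
  else pvBLoop (pvNC (depth.toNat - 1)) [(name, depth)] []

-- ===== PRECONDITION & SPEC =====
-- Pre_ excludes exactly depth ≤ 0, where the Python A raises Exception("depth must be positive").
def Pre_create_bad_dnssec_tree_zonelist (name : String) (depth : Int) : Prop := 1 ≤ depth
instance (name : String) (depth : Int) : Decidable (Pre_create_bad_dnssec_tree_zonelist name depth) := by
  unfold Pre_create_bad_dnssec_tree_zonelist; infer_instance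
def pvWitness_create_bad_dnssec_tree_zonelist : String × Int := ("example.com", 2)

def Spec_create_bad_dnssec_tree_zonelist (name : String) (depth : Int) (out : List String) : Prop := out = create_bad_dnssec_tree_zonelist_alt name depth
instance (name : String) (depth : Int) (out : List String) : Decidable (Spec_create_bad_dnssec_tree_zonelist name depth out) := by unfold Spec_create_bad_dnssec_tree_zonelist; infer_instance

-- ===== CLAIM (what is proved, stated in full; the proofs are below) =====
def Claim_equal_create_bad_dnssec_tree_zonelist : Prop := ∀ (name : String) (depth : Int), Dom_create_bad_dnssec_tree_zonelist name depth → Pre_create_bad_dnssec_tree_zonelist name depth → Spec_create_bad_dnssec_tree_zonelist name depth (create_bad_dnssec_tree_zonelist name depth)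

-- ===== LEMMAS AND PROOFS =====

theorem pvNC_pos (k : Nat) : 1 ≤ pvNC k := by
  cases k <;> simp [pvNC]

theorem portA_base (name : String) (d : Int) (h1 : 1 ≤ d) (h2 : ¬ 1 < d) :
    create_bad_dnssec_tree_zonelist name d = [name] := by
  have hd : d = 1 := by omega
  subst hd
  rfl

theorem portA_expand (name : String) (d : Int) (h : 1 < d) :
    create_bad_dnssec_tree_zonelist name d =
      name :: bad_dnssec_tree_delegations.flatMap
        (fun bdtd => create_bad_dnssec_tree_zonelist (bdtd ++ "." ++ name) (d - 1)) := by
  have hk : ∃ k : Nat, d.toNat = k + 2 ∧ (d - 1).toNat = k + 1 := ⟨d.toNat - 2, by omega⟩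
  obtain ⟨k, hk2, hk1⟩ := hk
  unfold create_bad_dnssec_tree_zonelist
  rw [hk2, hk1]
  rw [pvAgo]
  simp only [Nat.succ_pos, if_pos, PySem.List.foldl_append_eq_flatMap]
  rfl

-- the loop invariant: with enough fuel, draining the stack appends the preorder
-- listing (A's result) of every stack item, in stack order
theorem pvBLoop_drain (fuel : Nat) :
    ∀ (stack : List (String × Int)) (acc : List String),
      (∀ p ∈ stack, 1 ≤ p.2) →
      (stack.map (fun p => pvNC (p.2.toNat - 1))).sum ≤ fuel →
      pvBLoop fuel stack acc =
        acc ++ stack.flatMap (fun p => create_bad_dnssec_tree_zonelist p.1 p.2) := by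
  induction fuel with
  | zero =>
    intro stack acc hpos hm
    cases stack with
    | nil => simp [pvBLoop]
    | cons p rest =>
      exfalso
      have := pvNC_pos (p.2.toNat - 1)
      simp [List.map_cons, List.sum_cons] at hm
      omega
  | succ fuel ih =>
    intro stack acc hpos hm
    cases stack with
    | nil => simp [pvBLoop]
    | cons p rest =>
      obtain ⟨n, d⟩ := p
      have hd : 1 ≤ d := hpos (n, d) (List.mem_cons_self ..)
      by_cases h : 1 < d
      · rw [pvBLoop]
        simp only [h, if_pos]
        have hsum : ((bad_dnssec_tree_delegations.map (fun bdtd => (bdtd ++ "." ++ n, d - 1)) ++ rest).map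
            (fun p => pvNC (p.2.toNat - 1))).sum ≤ fuel := by
          have e1 : d.toNat - 1 = (d.toNat - 2) + 1 := by omega
          have e2 : (d - 1).toNat - 1 = d.toNat - 2 := by omega
          simp only [List.map_cons, List.sum_cons] at hm
          simp only [List.map_append, List.sum_append,
            bad_dnssec_tree_delegations, List.map_cons, List.map_nil, List.sum_cons,
            List.sum_nil] at *
          rw [e2]
          rw [e1, pvNC] at hm
          omega
        rw [ih _ _ ?_ hsum]
        · rw [show ((n, d) :: rest).flatMap (fun p => create_bad_dnssec_tree_zonelist p.1 p.2)
              = create_bad_dnssec_tree_zonelist n d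
                ++ rest.flatMap (fun p => create_bad_dnssec_tree_zonelist p.1 p.2) from List.flatMap_cons ..,
             portA_expand n d h]
          simp [List.flatMap_append, List.flatMap_map]
        · intro q hq
          rcases List.mem_append.mp hq with hq | hq
          · obtain ⟨b, _, rfl⟩ := List.mem_map.mp hq
            simp; omega
          · exact hpos q (List.mem_cons_of_mem _ hq)
      · rw [pvBLoop]
        simp only [h, if_false]
        have hsum : (rest.map (fun p => pvNC (p.2.toNat - 1))).sum ≤ fuel := by
          have := pvNC_pos (d.toNat - 1)
          simp only [List.map_cons, List.sum_cons] at hm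
          omega
        rw [ih _ _ (fun q hq => hpos q (List.mem_cons_of_mem _ hq)) hsum,
            List.flatMap_cons, portA_base n d hd h]
        simp

-- ===== VERDICT (by name: the statement is the Claim_ definition above) =====
theorem create_bad_dnssec_tree_zonelist_spec : Claim_equal_create_bad_dnssec_tree_zonelist := by
  intro name depth _ hpre
  have h1 : 1 ≤ depth := hpre
  unfold Spec_create_bad_dnssec_tree_zonelist create_bad_dnssec_tree_zonelist_alt
  rw [if_neg (by omega)]
  rw [pvBLoop_drain _ [(name, depth)] [] (by simp; omega) (by simp)]
  simp
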